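-- pv_equiv track=rewrite | github.com/john-mcfadyen/shared-hugo-module | scripts/cleanup-misplaced-links.py | get_char_position_after_n_words
-- ===== SOURCE A (Python) =====
-- def get_char_position_after_n_words(text: str, n_words: int) -> int:
--     """Get the character position in text after N words."""
--     if n_words <= 0:
--         return 0
--
--     words_found = 0
--     in_word = False
--
--     for i, char in enumerate(text):
--         if char.isspace():
--             if in_word:
--                 words_found += 1
--                 if words_found >= n_words:
--                     return i
--             in_word = False
--         else:
--             in_word = True
--
--     return len(text)
-- ===== SOURCE B (Python) =====
-- def get_char_position_after_n_words(text: str, n_words: int) -> int: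
--     """Get the character position in text after N words."""
--     if n_words <= 0:
--         return 0
--     length = len(text)
--     pos = 0
--     remaining = n_words
--     while True:
--         # skip the run of whitespace before the next word
--         while pos < length and text[pos].isspace():
--             pos += 1
--         if pos == length:
--             return length
--         # skip over the word itself
--         while pos < length and not text[pos].isspace():
--             pos += 1
--         if pos == length:
--             return length  # final word has no terminating space and is not counted
--         remaining -= 1
--         if remaining == 0:
--             return pos  # index of the space ending the n-th word
--         pos += 1  # step past that space
-- ===== Notes on version B (the rewrite author's own statement) =====
-- stated objective: alternative
-- what changed: Replaces A's char-by-char state machine (in_word flag + word counter over enumerate) by a two-pointer run-skipping loop over words: each outer iteration skips one whitespace run and one word run with inner pointer-advancing loops and a countdown of remaining words.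
import Mathlib
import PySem

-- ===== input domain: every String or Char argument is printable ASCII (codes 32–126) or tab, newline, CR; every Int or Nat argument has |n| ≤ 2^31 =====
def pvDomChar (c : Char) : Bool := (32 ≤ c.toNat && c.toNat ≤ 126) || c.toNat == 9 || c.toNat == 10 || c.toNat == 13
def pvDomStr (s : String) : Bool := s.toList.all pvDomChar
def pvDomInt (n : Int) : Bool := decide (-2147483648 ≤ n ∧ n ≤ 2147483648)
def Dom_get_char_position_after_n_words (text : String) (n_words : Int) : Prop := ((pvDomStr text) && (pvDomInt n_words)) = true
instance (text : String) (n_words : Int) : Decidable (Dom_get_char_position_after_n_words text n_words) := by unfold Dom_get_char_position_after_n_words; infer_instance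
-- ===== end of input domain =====

-- B replaces A's char-by-char flag state machine by a two-pointer run-skipping loop over words (objective: alternative).

-- ===== PORT A =====
-- the for-loop over enumerate(text): state = (words_found, in_word); some i = early return
def pvLoopA : List (Int × Char) → Int → Bool → Int → Option Int
  | [], _, _, _ => none
  | (i, c) :: rest, wf, iw, n =>
    if PySem.Str.isspace c then
      if iw then
        let wf' := wf + 1
        if wf' ≥ n then some i else pvLoopA rest wf' false n
      else pvLoopA rest wf false n
    else pvLoopA rest wf true n

def get_char_position_after_n_words (text : String) (n_words : Int) : Int :=
  if n_words ≤ 0 then 0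
  else (pvLoopA (PySem.List.enumerate text.toList 0) 0 false n_words).getD (text.toList.length : Int)

-- ===== PORT B =====
-- inner pointer loop "while pos < length and text[pos].isspace(): pos += 1"
def pvSkipSpaces : List Char → Int → List Char × Int
  | [], p => ([], p)
  | c :: r, p => if PySem.Str.isspace c then pvSkipSpaces r (p + 1) else (c :: r, p)

-- inner pointer loop "while pos < length and not text[pos].isspace(): pos += 1"
def pvSkipWord : List Char → Int → List Char × Int
  | [], p => ([], p)
  | c :: r, p => if PySem.Str.isspace c then (c :: r, p) else pvSkipWord r (p + 1)

-- the outer "while True" loop of B, one word per step; the fuel argument is a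
-- totality guard only (each step consumes at least one character, so
-- length + 1 fuel is never exhausted)
def pvLoopB : Nat → List Char → Int → Int → Int → Int
  | 0, _, _, _, total => total
  | fuel + 1, cs, pos, remaining, total =>
    match pvSkipSpaces cs pos with
    | ([], _) => total
    | (c1 :: r1, p1) =>
      match pvSkipWord (c1 :: r1) p1 with
      | ([], _) => total
      | (_ :: r2, p2) =>
        if remaining - 1 = 0 then p2
        else pvLoopB fuel r2 (p2 + 1) (remaining - 1) total

def get_char_position_after_n_words_alt (text : String) (n_words : Int) : Int :=
  if n_words ≤ 0 then 0
  else pvLoopB (text.toList.length + 1) text.toList 0 n_words (text.toList.length : Int)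

-- ===== PRECONDITION & SPEC =====
def Spec_get_char_position_after_n_words (text : String) (n_words : Int) (out : Int) : Prop := out = get_char_position_after_n_words_alt text n_words
instance (text : String) (n_words : Int) (out : Int) : Decidable (Spec_get_char_position_after_n_words text n_words out) := by unfold Spec_get_char_position_after_n_words; infer_instance

-- ===== CLAIM (what is proved, stated in full; the proofs are below) =====
def Claim_equal_get_char_position_after_n_words : Prop := ∀ (text : String) (n_words : Int), Dom_get_char_position_after_n_words text n_words → Spec_get_char_position_after_n_words text n_words (get_char_position_after_n_words text n_words)

-- ===== LEMMAS AND PROOFS =====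

theorem pvSkipSpaces_len_le (cs : List Char) : ∀ p : Int, (pvSkipSpaces cs p).1.length ≤ cs.length := by
  induction cs with
  | nil => intro p; simp [pvSkipSpaces]
  | cons c r ih =>
    intro p
    by_cases h : PySem.Str.isspace c
    · simp only [pvSkipSpaces, h, if_pos]
      exact le_trans (ih (p + 1)) (by simp)
    · simp [pvSkipSpaces, h]

theorem pvSkipWord_len_le (cs : List Char) : ∀ p : Int, (pvSkipWord cs p).1.length ≤ cs.length := by
  induction cs with
  | nil => intro p; simp [pvSkipWord]
  | cons c r ih =>
    intro p
    by_cases h : PySem.Str.isspace c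
    · simp [pvSkipWord, h]
    · simp only [pvSkipWord, h, if_neg]
      exact le_trans (ih (p + 1)) (by simp)

-- the head of a nonempty pvSkipSpaces result is not a space
theorem pvSkipSpaces_head : ∀ (cs : List Char) (p p1 : Int) (c1 : Char) (r1 : List Char),
    pvSkipSpaces cs p = (c1 :: r1, p1) → ¬ PySem.Str.isspace c1 = true := by
  intro cs
  induction cs with
  | nil => intro p p1 c1 r1 h; simp [pvSkipSpaces] at h
  | cons c r ih =>
    intro p p1 c1 r1 hh
    by_cases h : PySem.Str.isspace c
    · simp only [pvSkipSpaces, h, if_pos] at hh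
      exact ih (p + 1) p1 c1 r1 hh
    · simp only [pvSkipSpaces] at hh
      rw [if_neg h] at hh
      simp only [Prod.mk.injEq, List.cons.injEq] at hh
      exact hh.1.1 ▸ h

-- A's loop with in_word = false ignores a leading whitespace run
theorem pvLoopA_skipSpaces (cs : List Char) : ∀ (p wf n : Int),
    pvLoopA (PySem.List.enumerate cs p) wf false n =
      pvLoopA (PySem.List.enumerate (pvSkipSpaces cs p).1 (pvSkipSpaces cs p).2) wf false n := by
  induction cs with
  | nil => intro p wf n; simp [pvSkipSpaces]
  | cons c r ih =>
    intro p wf n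
    by_cases h : PySem.Str.isspace c
    · rw [PySem.List.enumerate_cons]
      simp only [pvLoopA, h, if_pos, pvSkipSpaces]
      exact ih (p + 1) wf n
    · simp [pvSkipSpaces, h]

-- A's loop with in_word = true runs through the word and reacts at the first following space
theorem pvLoopA_word (cs : List Char) : ∀ (p wf n : Int),
    pvLoopA (PySem.List.enumerate cs p) wf true n =
      (match pvSkipWord cs p with
       | ([], _) => none
       | (_ :: r2, p2) =>
         if wf + 1 ≥ n then some p2
         else pvLoopA (PySem.List.enumerate r2 (p2 + 1)) (wf + 1) false n) := by
  induction cs with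
  | nil => intro p wf n; simp [pvSkipWord, PySem.List.enumerate_nil, pvLoopA]
  | cons c r ih =>
    intro p wf n
    rw [PySem.List.enumerate_cons]
    by_cases h : PySem.Str.isspace c
    · simp [pvLoopA, h, pvSkipWord]
    · simp only [pvLoopA, h, if_neg, pvSkipWord]
      exact ih (p + 1) wf n

-- when the head is not a space the in_word flag is irrelevant for the next step
theorem pvLoopA_flag (c : Char) (r : List Char) (p wf n : Int) (h : ¬ PySem.Str.isspace c = true) :
    pvLoopA (PySem.List.enumerate (c :: r) p) wf false n =
      pvLoopA (PySem.List.enumerate (c :: r) p) wf true n := by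
  simp [PySem.List.enumerate_cons, pvLoopA, h]

-- main invariant: B's countdown `remaining` equals A's `n - wf`
theorem pvLoop_main : ∀ (k : Nat) (cs : List Char), cs.length < k →
    ∀ (p wf n T : Int), 1 ≤ n - wf →
      (pvLoopA (PySem.List.enumerate cs p) wf false n).getD T = pvLoopB k cs p (n - wf) T := by
  intro k
  induction k with
  | zero => intro cs hlen; exact absurd hlen (Nat.not_lt_zero _)
  | succ k ih =>
    intro cs hlen p wf n T hwf
    rw [pvLoopA_skipSpaces cs p wf n]
    have hA := pvSkipSpaces_len_le cs p
    rcases hS : pvSkipSpaces cs p with ⟨cs1, p1⟩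
    rw [hS] at hA
    simp only [pvLoopB, hS]
    cases cs1 with
    | nil => simp [PySem.List.enumerate_nil, pvLoopA]
    | cons c1 r1 =>
      have hns : ¬ PySem.Str.isspace c1 = true := pvSkipSpaces_head cs p p1 c1 r1 hS
      rw [pvLoopA_flag c1 r1 p1 wf n hns, pvLoopA_word (c1 :: r1) p1 wf n]
      have hB := pvSkipWord_len_le (c1 :: r1) p1
      rcases hW : pvSkipWord (c1 :: r1) p1 with ⟨cs2, p2⟩
      rw [hW] at hB
      cases cs2 with
      | nil => simp [hW]
      | cons c2 r2 =>
        simp only [hW]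
        by_cases hge : wf + 1 ≥ n
        · have h0 : n - wf - 1 = 0 := by omega
          simp [hge, h0]
        · have h0 : ¬ (n - wf - 1 = 0) := by omega
          have hlen2 : r2.length < k := by
            simp only [List.length_cons] at hA hB
            omega
          have hrec := ih r2 hlen2 (p2 + 1) (wf + 1) n T (by omega)
          have harg : n - (wf + 1) = n - wf - 1 := by ring
          rw [harg] at hrec
          simp [hge, h0, hrec]

-- ===== VERDICT (by name: the statement is the Claim_ definition above) =====
theorem get_char_position_after_n_words_spec : Claim_equal_get_char_position_after_n_words := by
  unfold Claim_equal_get_char_position_after_n_words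
  intro text n _
  unfold Spec_get_char_position_after_n_words
  unfold get_char_position_after_n_words get_char_position_after_n_words_alt
  by_cases hn : n ≤ 0
  · simp [hn]
  · have h1 : 1 ≤ n - 0 := by omega
    have := pvLoop_main (text.toList.length + 1) text.toList (by omega) 0 0 n (text.toList.length : Int) h1
    simp only [hn, if_false]
    simpa using this
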